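-- pv_equiv track=rewrite | github.com/mahrens917/common | src/common/redis_protocol/market_normalization.py | _resolve_keyword
-- ===== SOURCE A (Python) =====
-- from typing import Any, Callable, Dict, List, Mapping, MutableMapping, Optional, Tuple
--
-- def _resolve_keyword(tokens: List[str]) -> Optional[str]:
--     if "BETWEEN" in tokens:
--         return "between"
--     if any(token in {"LESS", "BELOW"} for token in tokens):
--         return "less"
--     if any(token in {"GREATER", "ABOVE"} for token in tokens):
--         return "greater"
--     return None
-- ===== SOURCE B (Python) =====
-- _CATEGORY = {
--     "BETWEEN": "between",
--     "LESS": "less",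
--     "BELOW": "less",
--     "GREATER": "greater",
--     "ABOVE": "greater",
-- }
--
-- def _resolve_keyword(tokens):
--     found = set()
--     for token in tokens:
--         category = _CATEGORY.get(token)
--         if category is not None:
--             found.add(category)
--     for keyword in ("between", "less", "greater"):
--         if keyword in found:
--             return keyword
--     return None
-- ===== Notes on version B (the rewrite author's own statement) =====
-- stated objective: alternative
-- what changed: Replaces A's up-to-three separate membership scans of the token list with a single collecting pass that maps each token to its category in a set, followed by a fixed priority check over the three categories.
import Mathlib
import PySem

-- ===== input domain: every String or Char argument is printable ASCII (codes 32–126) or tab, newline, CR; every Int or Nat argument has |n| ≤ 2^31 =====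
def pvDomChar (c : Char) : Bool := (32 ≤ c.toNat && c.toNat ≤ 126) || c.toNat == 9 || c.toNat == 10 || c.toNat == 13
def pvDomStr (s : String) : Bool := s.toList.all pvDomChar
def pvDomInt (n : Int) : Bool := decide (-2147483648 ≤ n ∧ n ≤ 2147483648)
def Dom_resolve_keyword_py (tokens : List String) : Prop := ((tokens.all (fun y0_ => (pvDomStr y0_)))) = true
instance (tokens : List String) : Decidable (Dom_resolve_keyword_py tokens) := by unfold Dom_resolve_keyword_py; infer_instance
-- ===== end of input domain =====

-- B replaces A's up-to-three membership scans by one token→category collecting pass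
-- plus a fixed priority check (alternative decomposition, same cost).

-- ===== PORT A =====
def resolve_keyword_py (tokens : List String) : Option String :=
  if tokens.contains "BETWEEN" then some "between"
  else if tokens.any (fun token => ["LESS", "BELOW"].contains token) then some "less"
  else if tokens.any (fun token => ["GREATER", "ABOVE"].contains token) then some "greater"
  else none

-- ===== PORT B =====
def rkCategory : PySem.Dict String String :=
  PySem.Dict.ofList [("BETWEEN", "between"), ("LESS", "less"), ("BELOW", "less"),
                     ("GREATER", "greater"), ("ABOVE", "greater")]

def resolve_keyword_py_alt (tokens : List String) : Option String :=
  let found : PySem.Set String :=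
    tokens.foldl (fun found token =>
      match PySem.Dict.get? rkCategory token with
      | some category => PySem.Set.add found category
      | none => found) PySem.Set.empty
  if PySem.Set.contains found "between" then some "between"
  else if PySem.Set.contains found "less" then some "less"
  else if PySem.Set.contains found "greater" then some "greater"
  else none

-- ===== PRECONDITION & SPEC =====
def Spec_resolve_keyword_py (tokens : List String) (out : Option String) : Prop := out = resolve_keyword_py_alt tokens
instance (tokens : List String) (out : Option String) : Decidable (Spec_resolve_keyword_py tokens out) := by unfold Spec_resolve_keyword_py; infer_instance

-- ===== CLAIM (what is proved, stated in full; the proofs are below) =====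
def Claim_equal_resolve_keyword_py : Prop := ∀ (tokens : List String), Dom_resolve_keyword_py tokens → Spec_resolve_keyword_py tokens (resolve_keyword_py tokens)

-- ===== LEMMAS AND PROOFS =====

-- membership in the collected set ↔ some token maps to that category
theorem mem_rk_foldl (tokens : List String) (acc : PySem.Set String) (c : String) :
    c ∈ tokens.foldl (fun found token =>
      match PySem.Dict.get? rkCategory token with
      | some category => PySem.Set.add found category
      | none => found) acc ↔
    c ∈ acc ∨ ∃ t ∈ tokens, PySem.Dict.get? rkCategory t = some c := by
  induction tokens generalizing acc with
  | nil => simp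
  | cons t ts ih =>
    simp only [List.foldl_cons, ih]
    cases h : PySem.Dict.get? rkCategory t with
    | none =>
      simp only [List.mem_cons]
      constructor
      · rintro (hc | ⟨u, hu, hcu⟩)
        · exact Or.inl hc
        · exact Or.inr ⟨u, Or.inr hu, hcu⟩
      · rintro (hc | ⟨u, (rfl | hu), hcu⟩)
        · exact Or.inl hc
        · rw [h] at hcu; cases hcu
        · exact Or.inr ⟨u, hu, hcu⟩
    | some cat =>
      rw [PySem.Set.mem_add]
      simp only [List.mem_cons]
      constructor
      · rintro ((hc | rfl) | ⟨u, hu, hcu⟩)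
        · exact Or.inl hc
        · exact Or.inr ⟨t, Or.inl rfl, h⟩
        · exact Or.inr ⟨u, Or.inr hu, hcu⟩
      · rintro (hc | ⟨u, (rfl | hu), hcu⟩)
        · exact Or.inl (Or.inl hc)
        · rw [h] at hcu; exact Or.inl (Or.inr (Option.some_injective _ hcu).symm)
        · exact Or.inr ⟨u, hu, hcu⟩

theorem rk_items : rkCategory.items = [("BETWEEN", "between"), ("LESS", "less"), ("BELOW", "less"),
    ("GREATER", "greater"), ("ABOVE", "greater")] := by decide

theorem rk_get_none (t : String) (h1 : t ≠ "BETWEEN") (h2 : t ≠ "LESS") (h3 : t ≠ "BELOW")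
    (h4 : t ≠ "GREATER") (h5 : t ≠ "ABOVE") : PySem.Dict.get? rkCategory t = none := by
  simp [PySem.Dict.get?, rk_items, List.find?_eq_none, beq_iff_eq]
  exact ⟨fun h => h1 h.symm, fun h => h2 h.symm, fun h => h3 h.symm,
         fun h => h4 h.symm, fun h => h5 h.symm⟩

theorem rk_get_between (t : String) :
    PySem.Dict.get? rkCategory t = some "between" ↔ t = "BETWEEN" := by
  by_cases h1 : t = "BETWEEN"; · subst h1; decide
  by_cases h2 : t = "LESS"; · subst h2; decide
  by_cases h3 : t = "BELOW"; · subst h3; decide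
  by_cases h4 : t = "GREATER"; · subst h4; decide
  by_cases h5 : t = "ABOVE"; · subst h5; decide
  rw [rk_get_none t h1 h2 h3 h4 h5]; simp [h1]

theorem rk_get_less (t : String) :
    PySem.Dict.get? rkCategory t = some "less" ↔ t = "LESS" ∨ t = "BELOW" := by
  by_cases h1 : t = "BETWEEN"; · subst h1; decide
  by_cases h2 : t = "LESS"; · subst h2; decide
  by_cases h3 : t = "BELOW"; · subst h3; decide
  by_cases h4 : t = "GREATER"; · subst h4; decide
  by_cases h5 : t = "ABOVE"; · subst h5; decide
  rw [rk_get_none t h1 h2 h3 h4 h5]; simp [h2, h3]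

theorem rk_get_greater (t : String) :
    PySem.Dict.get? rkCategory t = some "greater" ↔ t = "GREATER" ∨ t = "ABOVE" := by
  by_cases h1 : t = "BETWEEN"; · subst h1; decide
  by_cases h2 : t = "LESS"; · subst h2; decide
  by_cases h3 : t = "BELOW"; · subst h3; decide
  by_cases h4 : t = "GREATER"; · subst h4; decide
  by_cases h5 : t = "ABOVE"; · subst h5; decide
  rw [rk_get_none t h1 h2 h3 h4 h5]; simp [h4, h5]

-- ===== VERDICT (by name: the statement is the Claim_ definition above) =====
theorem resolve_keyword_py_spec : Claim_equal_resolve_keyword_py := by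
  intro tokens _
  unfold Spec_resolve_keyword_py resolve_keyword_py resolve_keyword_py_alt
  have hb : PySem.Set.contains (tokens.foldl (fun found token =>
      match PySem.Dict.get? rkCategory token with
      | some category => PySem.Set.add found category
      | none => found) PySem.Set.empty) "between" = tokens.contains "BETWEEN" := by
    rw [Bool.eq_iff_iff, PySem.Set.contains_iff, mem_rk_foldl, List.contains_iff_mem]
    simp [PySem.Set.empty, rk_get_between]
  have hl : PySem.Set.contains (tokens.foldl (fun found token =>
      match PySem.Dict.get? rkCategory token with
      | some category => PySem.Set.add found category
      | none => found) PySem.Set.empty) "less" = tokens.any (fun token => ["LESS", "BELOW"].contains token) := by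
    rw [Bool.eq_iff_iff, PySem.Set.contains_iff, mem_rk_foldl, List.any_eq_true]
    simp [PySem.Set.empty, rk_get_less]
  have hg : PySem.Set.contains (tokens.foldl (fun found token =>
      match PySem.Dict.get? rkCategory token with
      | some category => PySem.Set.add found category
      | none => found) PySem.Set.empty) "greater" = tokens.any (fun token => ["GREATER", "ABOVE"].contains token) := by
    rw [Bool.eq_iff_iff, PySem.Set.contains_iff, mem_rk_foldl, List.any_eq_true]
    simp [PySem.Set.empty, rk_get_greater]
  simp only [hb, hl, hg]
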